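-- pv_equiv track=rewrite | github.com/DolGuldurResidence/pylabs | sets_dicts.py | words_sorted_by_frequency
-- ===== SOURCE A (Python) =====
-- def words_sorted_by_frequency(text):
--     words = text.lower().split()
--     word_count = {}
--
--     for word in words:
--         if word in word_count:
--             word_count[word] += 1
--         else:
--             word_count[word] = 1
--
--     sorted_words = sorted(word_count, key=lambda word: (-word_count[word], word))
--     return sorted_words
-- ===== SOURCE B (Python) =====
-- def words_sorted_by_frequency(text):
--     words = text.lower().split()
--     counts = {}
--     for w in words:
--         counts[w] = counts.get(w, 0) + 1
--     buckets = {}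
--     for w, c in counts.items():
--         buckets.setdefault(c, []).append(w)
--     result = []
--     for c in sorted(buckets, reverse=True):
--         result.extend(sorted(buckets[c]))
--     return result
-- ===== Notes on version B (the rewrite author's own statement) =====
-- stated objective: alternative
-- what changed: Replaces the single sort under the composite key (-count, word) with a bucket-by-frequency structure: words are grouped into a dict keyed by count, the distinct counts are iterated in descending order, and each bucket is sorted alphabetically and appended to the result.
import Mathlib
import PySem

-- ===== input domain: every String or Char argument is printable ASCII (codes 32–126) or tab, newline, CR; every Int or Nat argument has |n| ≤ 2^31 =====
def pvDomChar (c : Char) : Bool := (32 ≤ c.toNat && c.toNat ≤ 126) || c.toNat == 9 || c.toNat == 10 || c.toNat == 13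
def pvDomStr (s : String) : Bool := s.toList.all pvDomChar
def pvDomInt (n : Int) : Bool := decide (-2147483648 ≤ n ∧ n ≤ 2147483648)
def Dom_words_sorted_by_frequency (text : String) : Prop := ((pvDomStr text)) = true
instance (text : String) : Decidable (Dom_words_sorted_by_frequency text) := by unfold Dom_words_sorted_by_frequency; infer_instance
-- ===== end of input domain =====

-- B replaces A's single sort under the composite key (-count, word) by frequency buckets
-- traversed in descending count order, each sorted alphabetically (objective: alternative).

-- ===== PORT A =====
def words_sorted_by_frequency (text : String) : List String :=
  let words := PySem.Str.split₀ (PySem.Str.lower text)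
  let word_count :=
    words.foldl
      (fun d w => if d.contains w then d.insert w (d.getD w 0 + 1) else d.insert w (1 : Int))
      PySem.Dict.empty
  -- sorted(word_count, key=lambda word: (-word_count[word], word)); word is always a key, so d[word] = getD
  PySem.List.sorted2 word_count.keys (fun w => -(word_count.getD w 0)) (fun w => w) false

-- ===== PORT B =====
def words_sorted_by_frequency_alt (text : String) : List String :=
  let words := PySem.Str.split₀ (PySem.Str.lower text)
  let counts := words.foldl (fun d w => d.insert w (d.getD w 0 + 1)) (PySem.Dict.empty : PySem.Dict String Int)
  -- buckets.setdefault(c, []).append(w)  ==  modify c with default [] appending w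
  let buckets :=
    counts.items.foldl (fun b p => b.modify p.2 ([] : List String) (fun l => l ++ [p.1]))
      PySem.Dict.empty
  (PySem.List.sorted buckets.keys (fun c => c) true).foldl
    (fun acc c => acc ++ PySem.List.sorted (buckets.getD c []) (fun w => w) false) []

-- ===== PRECONDITION & SPEC =====
def Spec_words_sorted_by_frequency (text : String) (out : List String) : Prop := out = words_sorted_by_frequency_alt text
instance (text : String) (out : List String) : Decidable (Spec_words_sorted_by_frequency text out) := by unfold Spec_words_sorted_by_frequency; infer_instance

-- ===== CLAIM (what is proved, stated in full; the proofs are below) =====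
def Claim_equal_words_sorted_by_frequency : Prop := ∀ (text : String), Dom_words_sorted_by_frequency text → Spec_words_sorted_by_frequency text (words_sorted_by_frequency text)

-- ===== LEMMAS AND PROOFS =====

-- the comparator sorted2 uses for key (-cnt w, w)
def pvLexLt (cnt : String → Int) (a b : String) : Bool :=
  decide (-(cnt a) < -(cnt b)) || (!decide (-(cnt b) < -(cnt a)) && decide (a < b))

theorem pvLexLt_iff (cnt : String → Int) (a b : String) :
    pvLexLt cnt a b = true ↔ cnt b < cnt a ∨ (cnt a = cnt b ∧ a < b) := by
  simp only [pvLexLt, Bool.or_eq_true, Bool.and_eq_true, Bool.not_eq_eq_eq_not, Bool.not_true,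
    decide_eq_true_eq, decide_eq_false_iff_not, not_lt, neg_lt_neg_iff]
  constructor
  · rintro (h | ⟨h1, h2⟩)
    · exact Or.inl h
    · rcases h1.lt_or_eq with h | h
      · exact Or.inl h
      · exact Or.inr ⟨h.symm, h2⟩
  · rintro (h | ⟨h1, h2⟩)
    · exact Or.inl h
    · exact Or.inr ⟨le_of_eq h1.symm, h2⟩

theorem pvLexLt_trans (cnt : String → Int) (a b c : String)
    (h1 : pvLexLt cnt a b = true) (h2 : pvLexLt cnt b c = true) : pvLexLt cnt a c = true := by
  rw [pvLexLt_iff] at *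
  rcases h1 with h1 | ⟨h1, h1'⟩ <;> rcases h2 with h2 | ⟨h2, h2'⟩
  · exact Or.inl (h2.trans h1)
  · exact Or.inl (h2 ▸ h1)
  · exact Or.inl (h1 ▸ h2)
  · exact Or.inr ⟨h1.trans h2, h1'.trans h2'⟩

theorem pvLexLt_asymm (cnt : String → Int) (a b : String)
    (h1 : pvLexLt cnt a b = true) (h2 : pvLexLt cnt b a = true) : False := by
  rw [pvLexLt_iff] at *
  rcases h1 with h1 | ⟨h1, h1'⟩ <;> rcases h2 with h2 | ⟨h2, h2'⟩
  · omega
  · omega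
  · omega
  · exact absurd h2' (lt_asymm h1')

theorem pvLexLt_total (cnt : String → Int) (a b : String) (hne : a ≠ b) :
    pvLexLt cnt a b = true ∨ pvLexLt cnt b a = true := by
  rw [pvLexLt_iff, pvLexLt_iff]
  rcases lt_trichotomy (cnt a) (cnt b) with h | h | h
  · exact Or.inr (Or.inl h)
  · rcases lt_or_gt_of_ne hne with h' | h'
    · exact Or.inl (Or.inr ⟨h, h'⟩)
    · exact Or.inr (Or.inr ⟨h.symm, h'⟩)
  · exact Or.inl (Or.inl h)

-- inserting a totally-comparable element keeps the list strictly sorted by lt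
theorem pv_insertBy_pairwise {α : Type} (lt : α → α → Bool)
    (htrans : ∀ a b c, lt a b = true → lt b c = true → lt a c = true)
    (x : α) (ys : List α) (hpw : ys.Pairwise (fun a b => lt a b = true))
    (hx : ∀ y ∈ ys, lt x y = true ∨ lt y x = true) :
    (PySem.List.insertBy lt x ys).Pairwise (fun a b => lt a b = true) := by
  induction ys with
  | nil => simp [PySem.List.insertBy]
  | cons y t ih =>
    rw [List.pairwise_cons] at hpw
    rw [PySem.List.insertBy]
    by_cases h : lt x y = true
    · simp only [h, if_true]
      refine List.Pairwise.cons ?_ (List.Pairwise.cons hpw.1 hpw.2)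
      intro z hz
      rcases List.mem_cons.mp hz with hz | hz
      · exact hz ▸ h
      · exact htrans _ _ _ h (hpw.1 z hz)
    · simp only [h]
      have hxy : lt y x = true := by
        rcases hx y (by simp) with h' | h'
        · exact absurd h' h
        · exact h'
      refine List.Pairwise.cons ?_ (ih hpw.2 (fun z hz => hx z (by simp [hz])))
      intro z hz
      rw [PySem.List.insertBy_mem_iff] at hz
      rcases hz with hz | hz
      · exact hz ▸ hxy
      · exact hpw.1 z hz

-- folding insertBy over pairwise-comparable elements yields a strictly sorted list
theorem pv_foldl_insertBy_pairwise {α : Type} (lt : α → α → Bool)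
    (htrans : ∀ a b c, lt a b = true → lt b c = true → lt a c = true)
    (xs : List α) : ∀ (acc : List α), acc.Pairwise (fun a b => lt a b = true) →
    (∀ x ∈ xs, ∀ y ∈ acc, lt x y = true ∨ lt y x = true) →
    xs.Pairwise (fun a b => lt a b = true ∨ lt b a = true) →
    (xs.foldl (fun acc x => PySem.List.insertBy lt x acc) acc).Pairwise
      (fun a b => lt a b = true) := by
  induction xs with
  | nil => intro acc hacc _ _; simpa using hacc
  | cons x rest ih =>
    intro acc hacc htot hxs
    rw [List.pairwise_cons] at hxs
    simp only [List.foldl_cons]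
    refine ih _ (pv_insertBy_pairwise lt htrans x acc hacc (fun y hy => htot x (by simp) y hy)) ?_ hxs.2
    intro x' hx' y hy
    rw [PySem.List.insertBy_mem_iff] at hy
    rcases hy with hy | hy
    · subst hy
      rcases hxs.1 x' hx' with h | h
      · exact Or.inr h
      · exact Or.inl h
    · exact htot x' (by simp [hx']) y hy

-- a strictly lt-sorted permutation of xs IS the result of the insertion sort
theorem pv_foldl_insertBy_eq {α : Type} (lt : α → α → Bool)
    (htrans : ∀ a b c, lt a b = true → lt b c = true → lt a c = true)
    (hasym : ∀ a b, lt a b = true → lt b a = true → False)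
    (xs ys : List α) (hperm : ys.Perm xs)
    (hpw : ys.Pairwise (fun a b => lt a b = true))
    (hxs : xs.Pairwise (fun a b => lt a b = true ∨ lt b a = true)) :
    xs.foldl (fun acc x => PySem.List.insertBy lt x acc) [] = ys := by
  have hperm' : (xs.foldl (fun acc x => PySem.List.insertBy lt x acc) []).Perm xs := by
    simpa using PySem.List.foldl_insertBy_perm lt xs []
  have hpwf : (xs.foldl (fun acc x => PySem.List.insertBy lt x acc) []).Pairwise
      (fun a b => lt a b = true) :=
    pv_foldl_insertBy_pairwise lt htrans xs [] (by simp) (by simp) hxs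
  refine List.Perm.eq_of_pairwise ?_ hpwf hpw (hperm'.trans hperm.symm)
  intro a b _ _ h1 h2
  exact (hasym a b h1 h2).elim

-- A's sorted2 under key (-cnt w, w) is the insertBy fold with comparator pvLexLt
theorem pv_sorted2_eq (cnt : String → Int) (xs : List String) :
    PySem.List.sorted2 xs (fun w => -(cnt w)) (fun w => w) false =
      xs.foldl (fun acc x => PySem.List.insertBy (pvLexLt cnt) x acc) [] := rfl

-- dropping the c-bucket from ks does not change the other buckets
theorem pv_flatMap_filter_drop {α : Type} [BEq α] (cnt : α → Int) (c : Int) (ks : List α) :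
    ∀ (cs : List Int), c ∉ cs →
    cs.flatMap (fun c' => ks.filter (fun k => cnt k == c')) =
      cs.flatMap (fun c' => (ks.filter (fun k => !(cnt k == c))).filter (fun k => cnt k == c')) := by
  intro cs hc
  induction cs with
  | nil => rfl
  | cons c' cs' ih =>
    have hne : c' ≠ c := fun h => hc (h ▸ List.mem_cons_self)
    simp only [List.flatMap_cons, ih (fun h => hc (List.mem_cons_of_mem _ h))]
    congr 1
    rw [List.filter_filter]
    apply List.filter_congr
    intro k _
    by_cases h : cnt k = c'
    · simp [h, hne]
    · simp [h]

-- grouping ks by its distinct cnt-values is a permutation of ks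
theorem pv_flatMap_perm {α : Type} [BEq α] (cnt : α → Int) :
    ∀ (cs : List Int) (ks : List α), cs.Nodup → (∀ k ∈ ks, cnt k ∈ cs) →
    (cs.flatMap (fun c => ks.filter (fun k => cnt k == c))).Perm ks := by
  intro cs
  induction cs with
  | nil =>
    intro ks _ hmem
    have : ks = [] := List.eq_nil_iff_forall_not_mem.mpr (fun k hk => by simpa using hmem k hk)
    simp [this]
  | cons c cs' ih =>
    intro ks hnd hmem
    rw [List.flatMap_cons, pv_flatMap_filter_drop cnt c ks cs' (List.nodup_cons.mp hnd).1]
    refine List.Perm.trans (List.Perm.append_left _ (ih _ (List.nodup_cons.mp hnd).2 ?_)) ?_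
    · intro k hk
      rcases List.mem_filter.mp hk with ⟨hk1, hk2⟩
      rcases List.mem_cons.mp (hmem k hk1) with h | h
      · exact absurd (beq_iff_eq.mpr h) (by simpa using hk2)
      · exact h
    · exact List.filter_append_perm _ ks

-- the grouped, per-bucket-sorted traversal is strictly pvLexLt-sorted
theorem pv_flatMap_pairwise (cnt : String → Int) (ks : List String) (hnd : ks.Nodup) :
    ∀ (cs : List Int), cs.Pairwise (fun a b => b < a) →
    (cs.flatMap (fun c =>
        PySem.List.sorted (ks.filter (fun k => cnt k == c)) (fun w => w) false)).Pairwise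
      (fun a b => pvLexLt cnt a b = true) := by
  intro cs
  induction cs with
  | nil => intro _; simp
  | cons c cs' ih =>
    intro hpw
    rw [List.pairwise_cons] at hpw
    rw [List.flatMap_cons, List.pairwise_append]
    have hmemb : ∀ x ∈ PySem.List.sorted (ks.filter (fun k => cnt k == c)) (fun w => w) false,
        cnt x = c := by
      intro x hx
      have := (PySem.List.mem_sorted _ _ _ _).mp hx
      exact beq_iff_eq.mp (List.mem_filter.mp this).2
    refine ⟨?_, ih hpw.2, ?_⟩
    · have hle : (PySem.List.sorted (ks.filter (fun k => cnt k == c)) (fun w => w) false).Pairwise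
          (fun a b => a ≤ b) := by
        simpa using PySem.List.sorted_pairwise (ks.filter (fun k => cnt k == c)) (fun w => w)
      have hndb : (PySem.List.sorted (ks.filter (fun k => cnt k == c)) (fun w => w) false).Nodup :=
        (PySem.List.sorted_perm _ _ _).symm.nodup (hnd.filter _)
      refine List.Pairwise.imp_of_mem ?_ (hle.and hndb)
      intro a b ha hb h
      rw [pvLexLt_iff]
      exact Or.inr ⟨(hmemb a ha).trans (hmemb b hb).symm, lt_of_le_of_ne h.1 h.2⟩
    · intro a ha b hb
      rcases List.mem_flatMap.mp hb with ⟨c', hc', hb'⟩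
      have hcb : cnt b = c' := by
        have := (PySem.List.mem_sorted _ _ _ _).mp hb'
        exact beq_iff_eq.mp (List.mem_filter.mp this).2
      rw [pvLexLt_iff]
      exact Or.inl (by rw [hcb, hmemb a ha]; exact hpw.1 c' hc')

-- the bucket accumulated for count c: the ks with that count, in order
theorem pv_getD_buckets (cnt : String → Int) (c : Int) :
    ∀ (l : List String) (d : PySem.Dict Int (List String)),
    (l.foldl (fun b k => b.modify (cnt k) ([] : List String) (fun v => v ++ [k])) d).getD c [] =
      d.getD c [] ++ l.filter (fun k => cnt k == c) := by
  intro l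
  induction l with
  | nil => intro d; simp
  | cons k l' ih =>
    intro d
    rw [List.foldl_cons, ih]
    by_cases h : c = cnt k
    · rw [List.filter_cons_of_pos (by simp [h]), PySem.Dict.getD_modify]
      simp [h]
    · rw [List.filter_cons_of_neg (by simp only [beq_iff_eq]; exact fun e => h (Eq.symm e)), PySem.Dict.getD_modify]
      simp [h]

-- sorting each bucket only permutes the concatenation
theorem pv_flatMap_sorted_perm (cnt : String → Int) (ks : List String) :
    ∀ (cs : List Int),
    (cs.flatMap (fun c =>
        PySem.List.sorted (ks.filter (fun k => cnt k == c)) (fun w => w) false)).Perm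
      (cs.flatMap (fun c => ks.filter (fun k => cnt k == c))) := by
  intro cs
  induction cs with
  | nil => simp
  | cons c cs' ih =>
    rw [List.flatMap_cons, List.flatMap_cons]
    exact List.Perm.append (PySem.List.sorted_perm _ _ _) ih

-- ===== VERDICT (by name: the statement is the Claim_ definition above) =====
theorem words_sorted_by_frequency_spec : Claim_equal_words_sorted_by_frequency := by
  intro text _
  unfold Spec_words_sorted_by_frequency words_sorted_by_frequency words_sorted_by_frequency_alt
  have hstep : (fun (d : PySem.Dict String Int) (w : String) =>
      if d.contains w then d.insert w (d.getD w 0 + 1) else d.insert w 1) =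
      (fun (d : PySem.Dict String Int) (w : String) => d.insert w (d.getD w 0 + 1)) := by
    funext d w
    by_cases h : d.contains w
    · simp [h]
    · rw [if_neg h, PySem.Dict.getD_of_not_contains _ _ (by simpa using h)]
      norm_num
  simp only [hstep, PySem.Dict.foldl_insert_getD_add_one_eq_counter, PySem.Dict.keys_counter,
    PySem.Dict.getD_counter, PySem.Dict.items_counter, List.foldl_map,
    PySem.Dict.keys_foldl_modify_key, PySem.Dict.keys_empty, PySem.Set.update_nil_left,
    pv_getD_buckets, PySem.Dict.getD_empty, List.nil_append,
    PySem.List.foldl_append_eq_flatMap, pv_sorted2_eq]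
  set words := PySem.Str.split₀ (PySem.Str.lower text) with hw
  set cnt : String → Int := fun w => (List.count w words : Int) with hcnt
  set ks := PySem.Set.ofList words with hks
  set cs := PySem.List.sorted (PySem.Set.ofList (ks.map cnt)) (fun c => c) true with hcs
  have hnd : ks.Nodup := PySem.Set.nodup_ofList words
  have hcsnd : cs.Nodup := (PySem.List.sorted_perm _ _ _).symm.nodup (PySem.Set.nodup_ofList _)
  have hcspw : cs.Pairwise (fun a b => b < a) := by
    have h1 := PySem.List.sorted_pairwise_rev (PySem.Set.ofList (ks.map cnt)) (fun c => c)
    exact (h1.and hcsnd).imp (fun h => lt_of_le_of_ne h.1 (fun e => h.2 (Eq.symm e)))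
  refine pv_foldl_insertBy_eq (pvLexLt cnt) (pvLexLt_trans cnt) (pvLexLt_asymm cnt) ks _ ?_ ?_ ?_
  · refine (pv_flatMap_sorted_perm cnt ks cs).trans
      (pv_flatMap_perm cnt cs ks hcsnd (fun k hk => ?_))
    exact (PySem.List.mem_sorted _ _ _ _).mpr ((PySem.Set.mem_ofList _ _).mpr (List.mem_map_of_mem hk))
  · exact pv_flatMap_pairwise cnt ks hnd cs hcspw
  · exact hnd.imp (fun h => pvLexLt_total cnt _ _ h)
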